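-- pv_equiv track=rewrite | github.com/Preflyer/MITPython | MITx_6.00.1/Quiz 1.py | McNuggets
-- ===== SOURCE A (Python) =====
-- def McNuggets(n):
--     """
--     n is an int
--
--     Returns True if some integer combination of 6, 9 and 20 equals n
--     Otherwise returns False.
--     """
--     if n < 6:
--         return False
--     elif n == 6 or n == 9 or n == 20 or n > 34:
--         return True
--     elif n%6 == 0 or n%9 == 0 or n%20 == 0:
--         return True
--     else:
--         while n >= 20:
--             return McNuggets(n-20)
--         while n >= 9:
--             return McNuggets(n-9)
--         while n >= 6:
--             return McNuggets(n-6)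
-- ===== SOURCE B (Python) =====
-- def McNuggets(n):
--     if n < 6:
--         return False
--     for k in range(n // 20 + 1):
--         m = n - 20 * k
--         if m % 3 == 0 and m != 3:
--             return True
--     return False
-- ===== Notes on version B (the rewrite author's own statement) =====
-- stated objective: alternative
-- what changed: Replaces A's deterministic greedy single-path recursion (subtract the largest of 20/9/6 and recurse) with a direct bounded search: try every count k of 20-packs and check whether the remainder is a sum of 6s and 9s (a multiple of 3 other than 3), which is correct and loop-based instead of recursive.
-- intended difference: On n in {21, 33, 37, 43} A returns the wrong answer for the 6/9/20 McNugget question its docstring states: A returns False on 21 and 33 (both buyable, 21=6+6+9, 33=6+9+9+9) and True on 37 and 43 (neither is buyable); B returns the docstring-correct value on all four. — e.g. on McNuggets(21): A returns false, B returns true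
import Mathlib
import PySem

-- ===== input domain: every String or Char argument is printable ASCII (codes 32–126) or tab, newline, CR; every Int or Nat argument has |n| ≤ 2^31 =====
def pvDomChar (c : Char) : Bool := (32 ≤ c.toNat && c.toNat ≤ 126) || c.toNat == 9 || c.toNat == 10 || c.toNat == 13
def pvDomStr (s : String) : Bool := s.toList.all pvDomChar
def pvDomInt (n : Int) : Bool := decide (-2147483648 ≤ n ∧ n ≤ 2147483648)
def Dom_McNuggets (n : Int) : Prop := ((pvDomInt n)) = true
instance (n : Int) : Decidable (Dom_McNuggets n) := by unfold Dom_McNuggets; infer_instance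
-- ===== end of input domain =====

-- B solves the stated 6/9/20 problem by a bounded loop over the count of 20-packs instead of A's
-- greedy single-path recursion; B is correct on the four inputs {21,33,37,43} where A is not (see D_).

-- ===== PORT A =====
-- Fuel makes A's recursion structural (kernel-evaluable); n.toNat is always enough fuel since each
-- recursive call (reached only for 6 < n ≤ 34) lowers n by at least 6 while fuel drops by 1.
def McNuggetsFuel : Nat → Int → Bool
  | 0, _ => false          -- unreachable with fuel = n.toNat
  | fuel + 1, n =>
    if n < 6 then false
    else if n = 6 ∨ n = 9 ∨ n = 20 ∨ n > 34 then true
    else if PySem.Int.mod n 6 = 0 ∨ PySem.Int.mod n 9 = 0 ∨ PySem.Int.mod n 20 = 0 then true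
    else if n ≥ 20 then McNuggetsFuel fuel (n - 20)
    else if n ≥ 9 then McNuggetsFuel fuel (n - 9)
    else if n ≥ 6 then McNuggetsFuel fuel (n - 6)
    else false             -- Python would fall through returning None; unreachable (n ≥ 7 here)

def McNuggets (n : Int) : Bool := McNuggetsFuel n.toNat n

-- ===== PORT B =====
def McNuggets_alt (n : Int) : Bool :=
  if n < 6 then false
  else (PySem.List.pyRange 0 (PySem.Int.floordiv n 20 + 1) 1).any
    (fun k => (PySem.Int.mod (n - 20 * k) 3 == 0) && !(n - 20 * k == 3))

-- ===== PRECONDITION & SPEC =====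
-- On n ∈ {21,33,37,43} A returns the wrong answer for its docstring's question (False on the buyable
-- 21 and 33, True on the unbuyable 37 and 43); B returns the correct value on all four.
def D_McNuggets (n : Int) : Prop := n = 21 ∨ n = 33 ∨ n = 37 ∨ n = 43
instance (n : Int) : Decidable (D_McNuggets n) := by unfold D_McNuggets; infer_instance

def Spec_McNuggets (n : Int) (out : Bool) : Prop := ¬ D_McNuggets n → out = McNuggets_alt n
instance (n : Int) (out : Bool) : Decidable (Spec_McNuggets n out) := by unfold Spec_McNuggets; infer_instance

def pvDiffWitness_McNuggets : Int := 21
def pvDiffWitnessOut_McNuggets : Bool × Bool := (false, true)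

-- ===== CLAIM (what is proved, stated in full; the proofs are below) =====
def Claim_unchanged_McNuggets : Prop := ∀ (n : Int), Dom_McNuggets n → Spec_McNuggets n (McNuggets n)
def Claim_changed_McNuggets : Prop := Dom_McNuggets (pvDiffWitness_McNuggets) ∧ D_McNuggets (pvDiffWitness_McNuggets) ∧ McNuggets (pvDiffWitness_McNuggets) = pvDiffWitnessOut_McNuggets.1 ∧ McNuggets_alt (pvDiffWitness_McNuggets) = pvDiffWitnessOut_McNuggets.2 ∧ pvDiffWitnessOut_McNuggets.1 ≠ pvDiffWitnessOut_McNuggets.2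
def Claim_exact_McNuggets : Prop := ∀ (n : Int), Dom_McNuggets n → D_McNuggets n → McNuggets n ≠ McNuggets_alt n

-- ===== LEMMAS AND PROOFS =====

theorem McNuggets_lt6 (n : Int) (h : n < 6) : McNuggets n = false := by
  unfold McNuggets
  cases hn : n.toNat with
  | zero => rfl
  | succ m => unfold McNuggetsFuel; rw [if_pos h]

theorem McNuggets_gt34 (n : Int) (h : 34 < n) : McNuggets n = true := by
  unfold McNuggets
  obtain ⟨m, hm⟩ : ∃ m, n.toNat = m + 1 := ⟨n.toNat - 1, by omega⟩
  rw [hm]; unfold McNuggetsFuel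
  rw [if_neg (by omega), if_pos (by omega)]

theorem McNuggets_alt_lt6 (n : Int) (h : n < 6) : McNuggets_alt n = false := by
  unfold McNuggets_alt; rw [if_pos h]

theorem McNuggets_alt_ge35 (n : Int) (h : 34 < n) (hD : ¬ D_McNuggets n) :
    McNuggets_alt n = true := by
  unfold D_McNuggets at hD
  unfold McNuggets_alt
  rw [if_neg (by omega), List.any_eq_true]
  have h3 : n % 3 = 0 ∨ n % 3 = 1 ∨ n % 3 = 2 := by omega
  have hmod : ∀ a : Int, PySem.Int.mod a 3 = a % 3 :=
    fun a => PySem.Int.mod_eq_emod_of_pos (by omega)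
  rcases h3 with h3 | h3 | h3
  · refine ⟨0, ?_, ?_⟩
    · rw [PySem.List.mem_pyRange_one]
      refine ⟨le_refl 0, by have := (PySem.Int.le_floordiv_iff_mul_le (a := n) (b := 20) (q := 0) (by omega)).mpr (by omega); omega⟩
    · simp only [hmod, Bool.and_eq_true, beq_iff_eq, Bool.not_eq_eq_eq_not, Bool.not_true,
        beq_eq_false_iff_ne, ne_eq]
      constructor <;> omega
  · -- n ≡ 1 (mod 3): use k = 2; n ≠ 37, n ≠ 43 force n ≥ 40
    refine ⟨2, ?_, ?_⟩
    · rw [PySem.List.mem_pyRange_one]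
      refine ⟨by omega, by have := (PySem.Int.le_floordiv_iff_mul_le (a := n) (b := 20) (q := 2) (by omega)).mpr (by omega); omega⟩
    · simp only [hmod, Bool.and_eq_true, beq_iff_eq, Bool.not_eq_eq_eq_not, Bool.not_true,
        beq_eq_false_iff_ne, ne_eq]
      constructor <;> omega
  · refine ⟨1, ?_, ?_⟩
    · rw [PySem.List.mem_pyRange_one]
      refine ⟨by omega, by have := (PySem.Int.le_floordiv_iff_mul_le (a := n) (b := 20) (q := 1) (by omega)).mpr (by omega); omega⟩
    · simp only [hmod, Bool.and_eq_true, beq_iff_eq, Bool.not_eq_eq_eq_not, Bool.not_true,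
        beq_eq_false_iff_ne, ne_eq]
      constructor <;> omega

-- ===== VERDICT (by name: the statement is the Claim_ definition above) =====
theorem McNuggets_spec : Claim_unchanged_McNuggets := by
  intro n _ hD
  by_cases h6 : n < 6
  · rw [McNuggets_lt6 n h6, McNuggets_alt_lt6 n h6]
  · by_cases h34 : 34 < n
    · rw [McNuggets_gt34 n h34, McNuggets_alt_ge35 n h34 hD]
    · have h1 : 6 ≤ n := by omega
      have h2 : n ≤ 34 := by omega
      revert hD
      interval_cases n <;> decide

theorem McNuggets_changed : Claim_changed_McNuggets := by
  unfold Claim_changed_McNuggets; decide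

theorem McNuggets_tight : Claim_exact_McNuggets := by
  intro n _ hd
  unfold D_McNuggets at hd
  rcases hd with rfl | rfl | rfl | rfl <;> decide
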